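-- pv_equiv track=rewrite | github.com/PaperBackPear3/adventofcode | 2023/day5/main.py | get_steps_maps_from_lines
-- ===== SOURCE A (Python) =====
-- def get_steps_maps_from_lines(lines):
--     steps = {}
--     index = 0
--     prev_line_key = ""
--     for line in lines:
--         if line != "":
--             if index == 0:
--                 steps[line] = []
--                 prev_line_key = line
--             if index > 0:
--                 steps[prev_line_key].append(
--                     [
--                         int(character)
--                         for character in line.split()
--                         if character.isdigit()
--                     ]
--                 )
--
--             index += 1
--         else:
--             index = 0
--     return steps
-- ===== SOURCE B (Python) =====
-- def _nums(line):
--     return [int(c) for c in line.split() if c.isdigit()]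
--
--
-- def get_steps_maps_from_lines(lines):
--     # Two-level decomposition: gather each run of consecutive non-empty lines
--     # into a block, then store block head -> parsed tail in one assignment.
--     steps = {}
--     block = []
--     for line in lines:
--         if line == "":
--             if block:
--                 steps[block[0]] = [_nums(l) for l in block[1:]]
--             block = []
--         else:
--             block.append(line)
--     if block:
--         steps[block[0]] = [_nums(l) for l in block[1:]]
--     return steps
-- ===== Notes on version B (the rewrite author's own statement) =====
-- stated objective: simpler
-- what changed: Replaces the single stateful loop (index counter + remembered previous key + incremental dict append) with a grouped two-level pass: collect each run of consecutive non-empty lines into a block, then assign block head -> parsed tail in one dict store.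
import Mathlib
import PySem

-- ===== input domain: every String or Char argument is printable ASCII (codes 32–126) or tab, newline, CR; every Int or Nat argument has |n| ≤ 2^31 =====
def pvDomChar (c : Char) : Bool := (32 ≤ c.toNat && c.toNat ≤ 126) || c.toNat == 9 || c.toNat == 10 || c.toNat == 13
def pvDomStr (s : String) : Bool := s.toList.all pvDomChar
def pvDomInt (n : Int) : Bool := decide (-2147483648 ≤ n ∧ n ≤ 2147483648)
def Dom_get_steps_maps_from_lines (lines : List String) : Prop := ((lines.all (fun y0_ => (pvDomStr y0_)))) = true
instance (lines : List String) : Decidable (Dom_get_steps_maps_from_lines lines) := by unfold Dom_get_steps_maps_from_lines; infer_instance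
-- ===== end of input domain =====

-- B restructures A's single stateful loop (index counter + remembered key + incremental
-- append) into a grouped two-level pass: blocks of consecutive non-empty lines, then one
-- dict assignment per block. Objective: simpler. Return values proved equal on the domain.

-- shared helper: [int(c) for c in line.split() if c.isdigit()] — identical comprehension
-- in both Pythons. int(c) cannot fail on an isdigit token, so the .getD 0 is unreachable.
def pvParseNums (line : String) : List Int :=
  ((PySem.Str.split₀ line).filter (fun c => PySem.Str.strIsdigit c)).map
    (fun c => (PySem.Int.ofStr? c).getD 0)

-- ===== PORT A =====
-- steps[prev].append(...) is ported as Dict.modify with default []: the key is always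
-- present when index > 0 (the index == 0 branch inserted it), so no KeyError is masked.
def pvStepA (st : PySem.Dict String (List (List Int)) × Int × String) (line : String) :
    PySem.Dict String (List (List Int)) × Int × String :=
  let steps := st.1
  let index := st.2.1
  let prev_line_key := st.2.2
  if line ≠ "" then
    let steps' := if index = 0 then steps.insert line [] else steps
    let prev' := if index = 0 then line else prev_line_key
    let steps'' := if index > 0 then steps'.modify prev' [] (· ++ [pvParseNums line]) else steps'
    (steps'', index + 1, prev')
  else
    (steps, 0, prev_line_key)

def get_steps_maps_from_lines (lines : List String) : List (String × List (List Int)) :=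
  (lines.foldl pvStepA (PySem.Dict.empty, 0, "")).1.items

-- ===== PORT B =====
-- 'if block: steps[block[0]] = [_nums(l) for l in block[1:]]'
def pvFlush (steps : PySem.Dict String (List (List Int))) (block : List String) :
    PySem.Dict String (List (List Int)) :=
  match block with
  | [] => steps
  | key :: rest => steps.insert key (rest.map pvParseNums)

def pvStepB (st : PySem.Dict String (List (List Int)) × List String) (line : String) :
    PySem.Dict String (List (List Int)) × List String :=
  if line = "" then (pvFlush st.1 st.2, []) else (st.1, st.2 ++ [line])

def get_steps_maps_from_lines_alt (lines : List String) : List (String × List (List Int)) :=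
  let st := lines.foldl pvStepB (PySem.Dict.empty, [])
  (pvFlush st.1 st.2).items

-- ===== PRECONDITION & SPEC =====
def Spec_get_steps_maps_from_lines (lines : List String) (out : List (String × List (List Int))) : Prop := out = get_steps_maps_from_lines_alt lines
instance (lines : List String) (out : List (String × List (List Int))) : Decidable (Spec_get_steps_maps_from_lines lines out) := by unfold Spec_get_steps_maps_from_lines; infer_instance

-- ===== CLAIM (what is proved, stated in full; the proofs are below) =====
def Claim_equal_get_steps_maps_from_lines : Prop := ∀ (lines : List String), Dom_get_steps_maps_from_lines lines → Spec_get_steps_maps_from_lines lines (get_steps_maps_from_lines lines)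

-- ===== LEMMAS AND PROOFS =====

-- loop invariant tying A's state (dict, index, prev key) to B's state (dict, block)
def pvRel (sA : PySem.Dict String (List (List Int)) × Int × String)
    (sB : PySem.Dict String (List (List Int)) × List String) : Prop :=
  match sB.2 with
  | [] => sA.2.1 = 0 ∧ sA.1 = sB.1
  | key :: rest =>
      sA.2.1 = ((key :: rest).length : Int) ∧ sA.2.2 = key ∧
      sA.1 = sB.1.insert key (rest.map pvParseNums)

theorem pvRel_flush {sA sB} (h : pvRel sA sB) : sA.1 = pvFlush sB.1 sB.2 := by
  rcases sB with ⟨t, b⟩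
  cases b with
  | nil => exact h.2
  | cons k rest => exact h.2.2

theorem pvRel_step (sA sB line) (h : pvRel sA sB) :
    pvRel (pvStepA sA line) (pvStepB sB line) := by
  rcases sA with ⟨s, i, p⟩
  rcases sB with ⟨t, b⟩
  by_cases hl : line = ""
  · subst hl
    cases b with
    | nil =>
      simpa [pvStepA, pvStepB, pvFlush, pvRel] using h.2
    | cons k rest =>
      simpa [pvStepA, pvStepB, pvFlush, pvRel] using h.2.2
  · cases b with
    | nil =>
      obtain ⟨hi, hs⟩ := h
      simp only [pvRel] at hi hs ⊢
      subst hi hs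
      simp [pvStepA, pvStepB, hl]
    | cons k rest =>
      obtain ⟨hi, hp, hs⟩ := h
      simp only [pvRel] at hi hp hs ⊢
      subst hp hs
      simp only [List.length_cons] at hi
      have hpos : (0 : Int) < i := by omega
      have hne : i ≠ 0 := by omega
      simp only [pvStepA, pvStepB, hl, ite_not, if_false, if_neg hne,
        if_pos hpos, List.cons_append]
      refine ⟨?_, ?_, ?_⟩
      · simp only [List.length_cons, List.length_append, List.length_cons, List.length_nil]
        omega
      · trivial
      · simp only [PySem.Dict.modify, PySem.Dict.getD_insert_self,
          PySem.Dict.insert_insert_self, List.map_append, List.map_cons, List.map_nil]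

theorem pvRel_foldl (lines : List String) (sA sB) (h : pvRel sA sB) :
    pvRel (lines.foldl pvStepA sA) (lines.foldl pvStepB sB) := by
  induction lines generalizing sA sB with
  | nil => exact h
  | cons line rest ih => exact ih _ _ (pvRel_step sA sB line h)

-- ===== VERDICT (by name: the statement is the Claim_ definition above) =====
theorem get_steps_maps_from_lines_spec : Claim_equal_get_steps_maps_from_lines := by
  intro lines _
  unfold Spec_get_steps_maps_from_lines get_steps_maps_from_lines get_steps_maps_from_lines_alt
  have h := pvRel_foldl lines (PySem.Dict.empty, 0, "") (PySem.Dict.empty, [])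
    (by simp [pvRel])
  rw [pvRel_flush h]
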